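-- pv_equiv track=rewrite | github.com/maastrichtlawtech/case-law-explorer | airflow/dags/lido_sqlite_monthly/tasks/build_sqlite.py | extract_ecli_from_subject
-- ===== SOURCE A (Python) =====
-- def extract_ecli_from_subject(subject: str) -> str:
--     """
--     Extract ECLI from subject URI.
--
--     Example: http://linkeddata.overheid.nl/terms/jurisprudentie/id/ECLI:NL:PHR:2024:123
--     Returns: ECLI:NL:PHR:2024:123
--
--     Args:
--         subject: Full subject URI
--
--     Returns:
--         ECLI identifier or empty string if not found
--     """
--     if not subject:
--         return ""
--
--     # ECLI is typically the last component after /id/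
--     parts = subject.split("/")
--     for i, part in enumerate(parts):
--         if part == "id" and i + 1 < len(parts):
--             return parts[i + 1]
--
--     return ""
-- ===== SOURCE B (Python) =====
-- def _first_component(tail):
--     j = tail.find("/")
--     return tail if j == -1 else tail[:j]
--
--
-- def extract_ecli_from_subject(subject: str) -> str:
--     """Extract ECLI from subject URI by locating the '/id/' separator directly."""
--     if not subject:
--         return ""
--     if subject == "id":
--         return ""
--     if subject.startswith("id/"):
--         return _first_component(subject[3:])
--     i = subject.find("/id/")
--     if i == -1:
--         return ""
--     return _first_component(subject[i + 4:])
-- ===== Notes on version B (the rewrite author's own statement) =====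
-- stated objective: idiomatic
-- what changed: Instead of splitting the URI on '/' and scanning the token list for a token equal to 'id' with a successor, B searches the string once for the fixed separator '/id/' with str.find (plus a startswith check for a leading 'id/' component) and slices out the component that follows.
import Mathlib
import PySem

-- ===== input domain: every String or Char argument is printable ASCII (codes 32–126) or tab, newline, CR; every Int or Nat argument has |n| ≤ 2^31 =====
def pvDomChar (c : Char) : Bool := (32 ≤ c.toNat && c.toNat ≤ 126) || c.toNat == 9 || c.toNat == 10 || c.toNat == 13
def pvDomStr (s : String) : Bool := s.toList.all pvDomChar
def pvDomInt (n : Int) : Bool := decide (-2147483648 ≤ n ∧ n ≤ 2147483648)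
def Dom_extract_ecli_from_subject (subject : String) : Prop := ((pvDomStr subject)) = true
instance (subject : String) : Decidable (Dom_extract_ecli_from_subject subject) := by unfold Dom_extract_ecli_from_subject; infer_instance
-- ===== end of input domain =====

-- B locates the fixed separator '/id/' with find (plus the leading 'id/' case) instead of splitting the URI into tokens and scanning them; objective: idiomatic.

-- ===== PORT A =====
def extract_ecli_from_subject (subject : String) : String :=
  if subject = "" then ""
  else
    let parts : List String := (PySem.Str.split? subject "/").getD []
    ((PySem.List.enumerate parts 0).foldl
      (fun acc ip =>
        match acc with
        | some r => some r
        | none =>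
          if ip.2 = "id" ∧ ip.1 + 1 < (parts.length : Int) then
            some (PySem.List.pyGetD parts (ip.1 + 1) "")
          else none)
      none).getD ""

-- ===== PORT B =====
-- B's helper _first_component(tail): the text before tail's first '/'
def pyFirstComponent (tail : String) : String :=
  if PySem.Str.find tail "/" = -1 then tail
  else PySem.Str.slice tail none (some (PySem.Str.find tail "/"))

def extract_ecli_from_subject_alt (subject : String) : String :=
  if subject = "" then ""
  else if subject = "id" then ""
  else if PySem.Str.startswith subject "id/" then
    pyFirstComponent (PySem.Str.slice subject (some 3) none)
  else if PySem.Str.find subject "/id/" = -1 then ""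
  else pyFirstComponent (PySem.Str.slice subject (some (PySem.Str.find subject "/id/" + 4)) none)

-- ===== PRECONDITION & SPEC =====
def Spec_extract_ecli_from_subject (subject : String) (out : String) : Prop := out = extract_ecli_from_subject_alt subject
instance (subject : String) (out : String) : Decidable (Spec_extract_ecli_from_subject subject out) := by unfold Spec_extract_ecli_from_subject; infer_instance

-- ===== CLAIM (what is proved, stated in full; the proofs are below) =====
def Claim_equal_extract_ecli_from_subject : Prop := ∀ (subject : String), Dom_extract_ecli_from_subject subject → Spec_extract_ecli_from_subject subject (extract_ecli_from_subject subject)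

-- ===== LEMMAS AND PROOFS =====

-- the four-character separator B searches for
def ecliPat : List Char := ['/', 'i', 'd', '/']

-- A's scan over the '/'-separated chunks, as the port computes it (string level)
def ecliFAs : List String → String
  | p :: q :: r => if p = "id" then q else ecliFAs (q :: r)
  | _ => ""

-- the same scan on the underlying character chunks
def ecliFA : List (List Char) → List Char
  | p :: q :: r => if p = ['i', 'd'] then q else ecliFA (q :: r)
  | _ => []

-- first '/'-separated segment of t (what tail.find('/') plus the slice compute)
def ecliSeg (t : List Char) : List Char :=
  if PySem.Chars.find t ['/'] = -1 then t else t.take (PySem.Chars.find t ['/']).toNat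

-- B's find('/id/') branch, on characters
def ecliH (t : List Char) : List Char :=
  if PySem.Chars.find t ecliPat = -1 then []
  else ecliSeg (t.drop ((PySem.Chars.find t ecliPat).toNat + 4))

-- all of B, on characters
def ecliG (t : List Char) : List Char :=
  if t = ['i', 'd'] then []
  else if ['i', 'd', '/'] <+: t then ecliSeg (t.drop 3)
  else ecliH t

lemma infix_iff_occ (sub s : List Char) : sub <:+: s ↔ ∃ j, sub <+: s.drop j := by
  rw [← PySem.Chars.isIn_iff_infix, ← PySem.Chars.exists_prefix_drop_iff_isIn]

-- find = k when there is an occurrence at k and none before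
lemma find_eq_of_first (s sub : List Char) (k : Nat)
    (h1 : sub <+: s.drop k) (h2 : ∀ i < k, ¬ sub <+: s.drop i) :
    PySem.Chars.find s sub = (k : Int) := by
  have hnn : 0 ≤ PySem.Chars.find s sub :=
    (PySem.Chars.find_nonneg_iff s sub).2 ((infix_iff_occ sub s).2 ⟨k, h1⟩)
  obtain ⟨hocc, hmin⟩ := PySem.Chars.find_spec hnn
  have hk : (PySem.Chars.find s sub).toNat = k := by
    rcases lt_trichotomy (PySem.Chars.find s sub).toNat k with h | h | h
    · exact absurd hocc (h2 _ h)
    · exact h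
    · exact absurd h1 (hmin _ h)
  omega

lemma find_eq_neg_one_of_not (s sub : List Char) (h : ∀ i, ¬ sub <+: s.drop i) :
    PySem.Chars.find s sub = -1 := by
  rw [PySem.Chars.find_eq_neg_one_iff, infix_iff_occ]
  rintro ⟨j, hj⟩
  exact h j hj

-- an occurrence of a pattern starting with '/' pins a '/' at that index
lemma slash_at {pp t : List Char} {i : Nat} (h : ('/' :: pp) <+: t.drop i) :
    t[i]? = some '/' := by
  obtain ⟨r, hr⟩ := h
  rw [← List.head?_drop, ← hr]
  rfl

lemma no_occ_in_free {pp p t : List Char} (hp : ('/' : Char) ∉ p) {i : Nat}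
    (hi : i < p.length) (h : ('/' :: pp) <+: (p ++ t).drop i) : False := by
  have h2 := slash_at h
  rw [List.getElem?_append_left hi] at h2
  exact hp (List.mem_of_getElem? h2)

lemma drop_append_ge {p t : List Char} {i : Nat} (h : p.length ≤ i) :
    (p ++ t).drop i = t.drop (i - p.length) := by
  rw [List.drop_append, List.drop_eq_nil_of_le h, List.nil_append]

lemma ecliH_append (p t : List Char) (hp : ('/' : Char) ∉ p) :
    ecliH (p ++ t) = ecliH t := by
  rcases eq_or_ne (PySem.Chars.find t ecliPat) (-1) with hneg | hpos
  · have hnocc : ∀ j, ¬ ecliPat <+: t.drop j := by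
      rw [PySem.Chars.find_eq_neg_one_iff, infix_iff_occ] at hneg
      push Not at hneg
      exact hneg
    have hnone : PySem.Chars.find (p ++ t) ecliPat = -1 := by
      apply find_eq_neg_one_of_not
      intro i hi
      rcases lt_or_ge i p.length with h | h
      · exact no_occ_in_free hp h hi
      · rw [drop_append_ge h] at hi
        exact hnocc _ hi
    simp [ecliH, hneg, hnone]
  · have h0 : 0 ≤ PySem.Chars.find t ecliPat := by
      have := PySem.Chars.neg_one_le_find t ecliPat
      omega
    obtain ⟨hocc, hmin⟩ := PySem.Chars.find_spec h0
    set m := (PySem.Chars.find t ecliPat).toNat with hm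
    have hfind : PySem.Chars.find (p ++ t) ecliPat = ((p.length + m : Nat) : Int) := by
      apply find_eq_of_first
      · rw [drop_append_ge (by omega)]
        simpa using hocc
      · intro i hi hpre
        rcases lt_or_ge i p.length with h | h
        · exact no_occ_in_free hp h hpre
        · rw [drop_append_ge h] at hpre
          exact hmin _ (by omega) hpre
    have hne : PySem.Chars.find (p ++ t) ecliPat ≠ -1 := by omega
    have hdrop : (p ++ t).drop ((PySem.Chars.find (p ++ t) ecliPat).toNat + 4) = t.drop (m + 4) := by
      rw [hfind]
      rw [drop_append_ge (by simp; omega)]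
      congr 1
      simp
      omega
    simp [ecliH, hne, hpos, hdrop, ← hm]

lemma ecliH_cons (t : List Char) :
    ecliH ('/' :: t) = if ['i', 'd', '/'] <+: t then ecliSeg (t.drop 3) else ecliH t := by
  by_cases hpre : ['i', 'd', '/'] <+: t
  · have hfind : PySem.Chars.find ('/' :: t) ecliPat = ((0 : Nat) : Int) := by
      apply find_eq_of_first
      · simpa [ecliPat, List.cons_prefix_cons] using hpre
      · omega
    have hne : PySem.Chars.find ('/' :: t) ecliPat ≠ -1 := by omega
    rw [ecliH, if_neg hne, hfind, if_pos hpre]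
    norm_num
  · rcases eq_or_ne (PySem.Chars.find t ecliPat) (-1) with hneg | hpos
    · have hnocc : ∀ j, ¬ ecliPat <+: t.drop j := by
        rw [PySem.Chars.find_eq_neg_one_iff, infix_iff_occ] at hneg
        push Not at hneg
        exact hneg
      have hnone : PySem.Chars.find ('/' :: t) ecliPat = -1 := by
        apply find_eq_neg_one_of_not
        intro i
        cases i with
        | zero =>
          intro h
          rw [List.drop_zero, ecliPat, List.cons_prefix_cons] at h
          exact hpre h.2
        | succ i' =>
          simpa using hnocc i'
      simp [ecliH, hneg, hnone, hpre]
    · have h0 : 0 ≤ PySem.Chars.find t ecliPat := by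
        have := PySem.Chars.neg_one_le_find t ecliPat
        omega
      obtain ⟨hocc, hmin⟩ := PySem.Chars.find_spec h0
      set m := (PySem.Chars.find t ecliPat).toNat with hm
      have hfind : PySem.Chars.find ('/' :: t) ecliPat = ((m + 1 : Nat) : Int) := by
        apply find_eq_of_first
        · simpa using hocc
        · intro i hi
          cases i with
          | zero =>
            intro h
            rw [List.drop_zero, ecliPat, List.cons_prefix_cons] at h
            exact hpre h.2
          | succ i' =>
            simpa using hmin i' (by omega)
      have hne : PySem.Chars.find ('/' :: t) ecliPat ≠ -1 := by omega
      rw [ecliH, if_neg hne, if_neg hpre, hfind, ecliH, if_neg hpos]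
      norm_num
      rfl

lemma find_slash_free (q : List Char) (hq : ('/' : Char) ∉ q) :
    PySem.Chars.find q ['/'] = -1 := by
  apply find_eq_neg_one_of_not
  intro i h
  exact hq (List.mem_of_getElem? (slash_at h))

lemma ecliSeg_free (q : List Char) (hq : ('/' : Char) ∉ q) : ecliSeg q = q := by
  simp [ecliSeg, find_slash_free q hq]

lemma ecliSeg_append (q r : List Char) (hq : ('/' : Char) ∉ q) :
    ecliSeg (q ++ '/' :: r) = q := by
  have hfind : PySem.Chars.find (q ++ '/' :: r) ['/'] = ((q.length : Nat) : Int) := by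
    apply find_eq_of_first
    · rw [List.drop_left]
      exact ⟨r, rfl⟩
    · intro i hi h
      exact no_occ_in_free hq hi h
  have hne : PySem.Chars.find (q ++ '/' :: r) ['/'] ≠ -1 := by omega
  rw [ecliSeg, if_neg hne, hfind]
  simp

lemma ecliH_free (p : List Char) (hp : ('/' : Char) ∉ p) : ecliH p = [] := by
  have : PySem.Chars.find p ecliPat = -1 := by
    apply find_eq_neg_one_of_not
    intro i h
    exact hp (List.mem_of_getElem? (slash_at h))
  simp [ecliH, this]

lemma prefix_id (p t : List Char) (hp : ('/' : Char) ∉ p)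
    (h : ['i', 'd', '/'] <+: p ++ '/' :: t) : p = ['i', 'd'] := by
  match p with
  | [] => simp [List.cons_prefix_cons] at h
  | [a] => simp [List.cons_prefix_cons] at h
  | [a, b] =>
    simp [List.cons_prefix_cons] at h
    simp [← h.1, ← h.2]
  | a :: b :: c :: p' =>
    simp [List.cons_prefix_cons] at h
    exact ((hp (by rw [h.2.2]; simp)) : False).elim

-- ===== characterization of PySem's splitOn on a single-character separator =====

lemma splitOn_go_spec : ∀ (fuel : Nat) (l cur : List Char) (acc : List (List Char)),
    l.length ≤ fuel →
    PySem.Chars.splitOn.go ['/'] fuel l cur acc =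
      acc.reverse ++ List.modifyHead (fun x => cur.reverse ++ x) (List.splitOn '/' l) := by
  intro fuel
  induction fuel with
  | zero =>
    intro l cur acc hl
    have : l = [] := List.length_eq_zero_iff.1 (by omega)
    subst this
    rw [PySem.Chars.splitOn.go]
    simp [List.splitOn, List.splitOnP_nil]
  | succ fuel ih =>
    intro l cur acc hl
    cases l with
    | nil =>
      rw [PySem.Chars.splitOn.go]
      · simp [List.splitOn, List.splitOnP_nil]
      · omega
    | cons c rest =>
      rw [PySem.Chars.splitOn.go]
      by_cases hc : c = '/'
      · subst hc
        have hpref : List.isPrefixOf ['/'] ('/' :: rest) = true := by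
          simp [List.isPrefixOf]
        rw [if_pos hpref]
        simp only [List.length_cons] at hl
        rw [ih _ _ _ (by simpa using Nat.le_of_succ_le_succ hl)]
        simp only [List.splitOn, List.splitOnP_cons, beq_self_eq_true, if_pos,
          List.reverse_cons, List.append_assoc, List.modifyHead_cons, List.reverse_nil,
          List.nil_append, List.cons_append]
        have hd : List.drop ['/'].length ('/' :: rest) = rest := rfl
        rw [hd]
        rcases hsp : List.splitOnP (fun x => x == '/') rest with _ | ⟨r0, rs⟩ <;> simp
      · have hpref : ¬ (List.isPrefixOf ['/'] (c :: rest) = true) := by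
          simp [List.isPrefixOf]
          exact fun h => absurd h.symm hc
        rw [if_neg hpref]
        simp only [List.length_cons] at hl
        rw [ih _ _ _ (by omega)]
        have hne := List.splitOnP_ne_nil (fun x => x == '/') rest
        obtain ⟨r0, rs, hr⟩ : ∃ r0 rs, List.splitOnP (fun x => x == '/') rest = r0 :: rs := by
          cases hsp : List.splitOnP (fun x => x == '/') rest with
          | nil => exact absurd hsp hne
          | cons r0 rs => exact ⟨r0, rs, rfl⟩
        simp [List.splitOn, List.splitOnP_cons, hc, hr]

lemma splitOn_bridge (cs : List Char) :
    PySem.Chars.splitOn cs ['/'] = List.splitOn '/' cs := by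
  unfold PySem.Chars.splitOn
  rw [splitOn_go_spec _ _ _ _ (by omega)]
  have hne := List.splitOnP_ne_nil (fun x => x == '/') cs
  obtain ⟨r0, rs, hr⟩ : ∃ r0 rs, List.splitOnP (fun x => x == '/') cs = r0 :: rs := by
    cases hsp : List.splitOnP (fun x => x == '/') cs with
    | nil => exact absurd hsp hne
    | cons r0 rs => exact ⟨r0, rs, rfl⟩
  simp [List.splitOn, hr]

lemma splitOn_free (l : List Char) : ∀ p ∈ List.splitOn '/' l, ('/' : Char) ∉ p := by
  induction l with
  | nil => simp [List.splitOn, List.splitOnP_nil]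
  | cons c cs ih =>
    by_cases hc : c = '/'
    · subst hc
      intro p hp
      rw [List.splitOn, List.splitOnP_cons] at hp
      simp at hp
      rcases hp with h | h
      · simp [h]
      · exact ih p h
    · intro p hp
      rw [List.splitOn, List.splitOnP_cons, if_neg (by simp [hc])] at hp
      have hne := List.splitOnP_ne_nil (fun x => x == '/') cs
      obtain ⟨r0, rs, hr⟩ : ∃ r0 rs, List.splitOnP (fun x => x == '/') cs = r0 :: rs := by
        cases hsp : List.splitOnP (fun x => x == '/') cs with
        | nil => exact absurd hsp hne
        | cons r0 rs => exact ⟨r0, rs, rfl⟩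
      rw [hr] at hp
      simp at hp
      rcases hp with h | h
      · subst h
        intro hmem
        rcases List.mem_cons.1 hmem with h | h
        · exact hc h.symm
        · exact ih r0 (by rw [List.splitOn, hr]; exact List.mem_cons_self) h
      · exact ih p (by rw [List.splitOn, hr]; exact List.mem_cons_of_mem _ h)

-- ===== A's loop =====

lemma loopA_some (parts : List String) (l : List (Int × String)) (r : String) :
    l.foldl
      (fun acc ip =>
        match acc with
        | some r' => some r'
        | none =>
          if ip.2 = "id" ∧ ip.1 + 1 < (parts.length : Int) then
            some (PySem.List.pyGetD parts (ip.1 + 1) "")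
          else none)
      (some r) = some r := by
  induction l with
  | nil => rfl
  | cons x xs ih => simpa using ih

lemma loopA_main (parts : List String) : ∀ (l : List String) (k : Nat), parts.drop k = l →
    ((PySem.List.enumerate l (k : Int)).foldl
      (fun acc ip =>
        match acc with
        | some r' => some r'
        | none =>
          if ip.2 = "id" ∧ ip.1 + 1 < (parts.length : Int) then
            some (PySem.List.pyGetD parts (ip.1 + 1) "")
          else none)
      none).getD "" = ecliFAs l := by
  intro l
  induction l with
  | nil => intro k _; simp [PySem.List.enumerate_nil, ecliFAs]
  | cons p rest ih =>
    intro k hk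
    rw [PySem.List.enumerate_cons]
    have hk1 : parts.drop (k + 1) = rest := by
      rw [← List.tail_drop, hk]
      rfl
    have hklt : k < parts.length := by
      by_contra h
      rw [List.drop_eq_nil_of_le (by omega)] at hk
      simp at hk
    rw [List.foldl_cons]
    by_cases hp : p = "id"
    · cases rest with
      | nil =>
        have hlen : parts.length = k + 1 := by
          have := congrArg List.length hk
          simp at this
          omega
        have hguard : ¬ (p = "id" ∧ (k : Int) + 1 < (parts.length : Int)) := by
          rintro ⟨_, h⟩
          rw [hlen] at h
          push_cast at h
          omega
        simp only [hguard, if_neg, not_false_iff]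
        simp [PySem.List.enumerate_nil, ecliFAs]
      | cons q rs =>
        have hlen : k + 1 < parts.length := by
          have := congrArg List.length hk
          simp at this
          omega
        have hguard : p = "id" ∧ (k : Int) + 1 < (parts.length : Int) := by
          exact ⟨hp, by omega⟩
        rw [if_pos hguard]
        have hq : PySem.List.pyGetD parts ((k : Int) + 1) "" = q := by
          have : ((k : Int) + 1) = ((k + 1 : Nat) : Int) := by push_cast; ring
          rw [this, PySem.List.pyGetD_natCast, List.getD_eq_getElem?_getD, ← List.head?_drop, hk1]
          rfl
        rw [hq, loopA_some]
        simp [ecliFAs, hp]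
    · have hguard : ¬ (p = "id" ∧ (k : Int) + 1 < (parts.length : Int)) := by
        rintro ⟨h, _⟩
        exact hp h
      rw [if_neg hguard]
      have : ((k : Int) + 1) = ((k + 1 : Nat) : Int) := by push_cast; ring
      rw [this, ih (k + 1) hk1]
      cases rest with
      | nil => simp [ecliFAs]
      | cons q rs => simp [ecliFAs, hp]

lemma ofList_eq_id_iff (p : List Char) : String.ofList p = "id" ↔ p = ['i', 'd'] := by
  rw [← String.toList_inj]
  simp

lemma ecliFAs_map (l : List (List Char)) :
    ecliFAs (l.map String.ofList) = String.ofList (ecliFA l) := by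
  induction l with
  | nil => simp [ecliFAs, ecliFA]
  | cons p rest ih =>
    cases rest with
    | nil => simp [ecliFAs, ecliFA]
    | cons q rs =>
      simp only [List.map_cons, ecliFAs, ecliFA]
      by_cases hp : p = ['i', 'd']
      · rw [if_pos ((ofList_eq_id_iff p).2 hp), if_pos hp]
      · rw [if_neg (fun h => hp ((ofList_eq_id_iff p).1 h)), if_neg hp]
        simpa using ih

lemma portA_eq (s : String) :
    extract_ecli_from_subject s = String.ofList (ecliFA (List.splitOn '/' s.toList)) := by
  by_cases hs : s = ""
  · subst hs
    have : ("" : String).toList = [] := rfl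
    rw [extract_ecli_from_subject, if_pos rfl, this]
    simp [List.splitOn, List.splitOnP_nil, ecliFA]
  · rw [extract_ecli_from_subject, if_neg hs]
    have hparts : (PySem.Str.split? s "/").getD [] = (List.splitOn '/' s.toList).map String.ofList := by
      rw [PySem.Str.split?]
      have : ("/" : String).toList = ['/'] := rfl
      rw [this, PySem.Chars.split?]
      simp [splitOn_bridge]
    simp only [hparts]
    have := loopA_main ((List.splitOn '/' s.toList).map String.ofList)
      ((List.splitOn '/' s.toList).map String.ofList) 0 (by simp)
    simp only [Nat.cast_zero] at this
    rw [this, ecliFAs_map]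

-- ===== B's port equals ecliG =====

lemma firstComponent_eq (t : String) : pyFirstComponent t = String.ofList (ecliSeg t.toList) := by
  rw [pyFirstComponent, ecliSeg]
  have hsl : ("/" : String).toList = ['/'] := rfl
  rw [PySem.Str.find_eq, hsl]
  by_cases hj : PySem.Chars.find t.toList ['/'] = -1
  · rw [if_pos hj, if_pos hj, ← String.toList_inj]
    simp
  · rw [if_neg hj, if_neg hj, ← String.toList_inj]
    rw [PySem.Str.toList_slice, PySem.Chars.slice_eq_listSlice]
    have h0 : 0 ≤ PySem.Chars.find t.toList ['/'] := by
      have := PySem.Chars.neg_one_le_find t.toList ['/']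
      omega
    rw [PySem.List.slice_to _ h0]
    simp

lemma portB_eq (s : String) :
    extract_ecli_from_subject_alt s = String.ofList (ecliG s.toList) := by
  by_cases hs : s = ""
  · subst hs; decide
  · by_cases hid : s = "id"
    · subst hid; decide
    · rw [extract_ecli_from_subject_alt, if_neg hs, if_neg hid]
      have hcsne : s.toList ≠ ['i', 'd'] := by
        intro h
        apply hid
        rw [← String.toList_inj, h]
        rfl
      rw [ecliG, if_neg hcsne]
      have htail3 : (PySem.Str.slice s (some 3) none).toList = s.toList.drop 3 := by
        rw [PySem.Str.toList_slice, PySem.Chars.slice_eq_listSlice,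
          PySem.List.slice_from _ (by omega : (0:Int) ≤ 3)]
        rfl
      by_cases hpre : ['i', 'd', '/'] <+: s.toList
      · have hsw : PySem.Str.startswith s "id/" = true := by
          rw [PySem.Str.startswith_eq]
          have h2 : ("id/" : String).toList = ['i', 'd', '/'] := rfl
          rw [h2, PySem.Chars.startswith_iff]
          exact hpre
        rw [if_pos hsw, if_pos hpre, firstComponent_eq, htail3]
      · have hsw : ¬ (PySem.Str.startswith s "id/" = true) := by
          rw [PySem.Str.startswith_eq]
          have h2 : ("id/" : String).toList = ['i', 'd', '/'] := rfl
          rw [h2, PySem.Chars.startswith_iff]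
          exact hpre
        rw [if_neg hsw, if_neg hpre]
        have hfind : PySem.Str.find s "/id/" = PySem.Chars.find s.toList ecliPat := by
          rw [PySem.Str.find_eq]
          rfl
        rw [hfind, ecliH]
        by_cases hi : PySem.Chars.find s.toList ecliPat = -1
        · rw [if_pos hi, if_pos hi]
        · rw [if_neg hi, if_neg hi, firstComponent_eq]
          have h0 : 0 ≤ PySem.Chars.find s.toList ecliPat := by
            have := PySem.Chars.neg_one_le_find s.toList ecliPat
            omega
          have htail : (PySem.Str.slice s (some (PySem.Chars.find s.toList ecliPat + 4)) none).toList
              = s.toList.drop ((PySem.Chars.find s.toList ecliPat).toNat + 4) := by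
            rw [PySem.Str.toList_slice, PySem.Chars.slice_eq_listSlice,
              PySem.List.slice_from _ (by omega)]
            congr 1
            omega
          rw [htail]

-- ===== the combinatorial core: B on the glued string = A on the chunks =====

lemma main_parts : ∀ (parts : List (List Char)), parts ≠ [] →
    (∀ p ∈ parts, ('/' : Char) ∉ p) →
    ecliG (['/'].intercalate parts) = ecliFA parts := by
  intro parts
  induction parts with
  | nil => intro h; exact absurd rfl h
  | cons p rest ih =>
    intro _ hfree
    have hp : ('/' : Char) ∉ p := hfree p List.mem_cons_self
    cases rest with
    | nil =>
      have hint : ['/'].intercalate [p] = p := by simp [List.intercalate]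
      rw [hint]
      have hFA : ecliFA [p] = [] := rfl
      rw [hFA, ecliG]
      by_cases hpid : p = ['i', 'd']
      · rw [if_pos hpid]
      · rw [if_neg hpid, if_neg (fun h => hp (h.subset (by simp))), ecliH_free p hp]
    | cons q rs =>
      have hint : ['/'].intercalate (p :: q :: rs) = p ++ '/' :: ['/'].intercalate (q :: rs) := by
        simp [List.intercalate]
      rw [hint]
      set cs' := ['/'].intercalate (q :: rs) with hcs'
      have hfree' : ∀ x ∈ q :: rs, ('/' : Char) ∉ x := fun x hx => hfree x (List.mem_cons_of_mem _ hx)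
      have hih : ecliG cs' = ecliFA (q :: rs) := ih (List.cons_ne_nil _ _) hfree'
      have hslash : ('/' : Char) ∈ p ++ '/' :: cs' := by simp
      have hnid : p ++ '/' :: cs' ≠ ['i', 'd'] := by
        intro h
        rw [h] at hslash
        simp at hslash
      have hsegq : ecliSeg cs' = q := by
        cases rs with
        | nil =>
          have : cs' = q := by simp [hcs', List.intercalate]
          rw [this]
          exact ecliSeg_free q (hfree' q List.mem_cons_self)
        | cons r rs' =>
          have : cs' = q ++ '/' :: ['/'].intercalate (r :: rs') := by
            simp [hcs', List.intercalate]
          rw [this]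
          exact ecliSeg_append q _ (hfree' q List.mem_cons_self)
      by_cases hpid : p = ['i', 'd']
      · subst hpid
        have heq : (['i', 'd'] ++ '/' :: cs') = ['i', 'd', '/'] ++ cs' := rfl
        have hpre : ['i', 'd', '/'] <+: ['i', 'd'] ++ '/' :: cs' := by
          rw [heq]
          exact List.prefix_append _ _
        rw [ecliG, if_neg hnid, if_pos hpre]
        have hdrop : (['i', 'd'] ++ '/' :: cs').drop 3 = cs' := rfl
        rw [hdrop, hsegq]
        rfl
      · have hnpre : ¬ (['i', 'd', '/'] <+: p ++ '/' :: cs') :=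
          fun h => hpid (prefix_id p cs' hp h)
        rw [ecliG, if_neg hnid, if_neg hnpre, ecliH_append p _ hp, ecliH_cons]
        have hFA : ecliFA (p :: q :: rs) = ecliFA (q :: rs) := by
          rw [ecliFA, if_neg hpid]
        rw [hFA, ← hih]
        by_cases hid' : cs' = ['i', 'd']
        · rw [hid']
          decide
        · rw [ecliG, if_neg hid']

-- ===== VERDICT (by name: the statement is the Claim_ definition above) =====
theorem extract_ecli_from_subject_spec : Claim_equal_extract_ecli_from_subject := by
  intro s _
  unfold Spec_extract_ecli_from_subject
  rw [portA_eq, portB_eq]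
  congr 1
  rw [← main_parts (List.splitOn '/' s.toList) (List.splitOnP_ne_nil _ _) (splitOn_free s.toList)]
  congr 1
  exact List.intercalate_splitOn s.toList '/'
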